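-- pv_equiv track=rewrite | github.com/edenkim9741/Reinforcement-Learning | cleanrl/code/ppo_chess_vs_stockfish_clean.py | _get_queen_plane
-- ===== SOURCE A (Python) =====
-- from typing import Optional, Tuple
--
-- def _sign(v: int) -> int:
--     """부호 반환"""
--     return -1 if v < 0 else (1 if v > 0 else 0)
--
-- def _get_queen_plane(diff: Tuple[int, int]) -> int:
--     """퀸 이동에 대한 평면 인덱스 계산"""
--     dx, dy = diff
--     magnitude = max(abs(dx), abs(dy)) - 1
--     counter = 0
--     for x in range(-1, 2):
--         for y in range(-1, 2):
--             if x == 0 and y == 0: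
--                 continue
--             if x == _sign(dx) and y == _sign(dy):
--                 return magnitude * 8 + counter
--             counter += 1
--     return 0
-- ===== SOURCE B (Python) =====
-- from typing import Optional, Tuple
--
-- def _get_queen_plane(diff: Tuple[int, int]) -> int:
--     # Closed form: A's counter for sign pair (sx, sy) is position 3*(sx+1)+(sy+1)
--     # in the 3x3 grid, minus one if past the skipped centre (0,0) at position 4.
--     # With k = 3*sx + sy (k = 0 iff diff == (0,0)) that is k+4 for k < 0, k+3 for k > 0.
--     dx, dy = diff
--     k = 3 * ((dx > 0) - (dx < 0)) + ((dy > 0) - (dy < 0))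
--     if k == 0:
--         return 0
--     return (max(abs(dx), abs(dy)) - 1) * 8 + (k + 4 if k < 0 else k + 3)
-- ===== Notes on version B (the rewrite author's own statement) =====
-- stated objective: simpler
-- what changed: The nested 3x3 scan with a running counter is replaced by a closed-form arithmetic index: B computes k = 3*sign(dx)+sign(dy) and maps it directly to the plane via k+4 (k<0) / k+3 (k>0), with 0 for the zero vector; no loop, no table, no lookup.
import Mathlib
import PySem

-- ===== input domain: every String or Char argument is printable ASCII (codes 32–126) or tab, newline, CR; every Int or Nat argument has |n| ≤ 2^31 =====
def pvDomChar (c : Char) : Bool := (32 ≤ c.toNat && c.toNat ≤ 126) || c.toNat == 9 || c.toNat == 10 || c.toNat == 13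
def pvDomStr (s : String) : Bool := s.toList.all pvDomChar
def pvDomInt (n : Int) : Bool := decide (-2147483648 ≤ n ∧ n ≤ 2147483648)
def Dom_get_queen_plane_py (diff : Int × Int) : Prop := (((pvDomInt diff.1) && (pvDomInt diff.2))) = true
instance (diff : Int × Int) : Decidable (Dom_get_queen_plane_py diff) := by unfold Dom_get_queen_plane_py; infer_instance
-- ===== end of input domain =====

-- B replaces A's nested 3x3 scan with a closed-form arithmetic index from the sign pair: simpler, loop-free.

-- ===== PORT A =====
def sign_py (v : Int) : Int := if v < 0 then -1 else if v > 0 then 1 else 0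

-- A's nested loop with early return, modelled as a fold carrying (early-result, counter).
def get_queen_plane_py (diff : Int × Int) : Int :=
  let dx := diff.1
  let dy := diff.2
  let magnitude := max |dx| |dy| - 1
  let st :=
    (PySem.List.pyRange (-1) 2 1).foldl (fun st x =>
      (PySem.List.pyRange (-1) 2 1).foldl (fun (st : Option Int × Int) y =>
        match st with
        | (some r, c) => (some r, c)
        | (none, c) =>
          if x = 0 ∧ y = 0 then (none, c)
          else if x = sign_py dx ∧ y = sign_py dy then (some (magnitude * 8 + c), c)
          else (none, c + 1)) st) ((none, 0) : Option Int × Int)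
  match st.1 with
  | some r => r
  | none => 0

-- ===== PORT B =====
def get_queen_plane_py_alt (diff : Int × Int) : Int :=
  let dx := diff.1
  let dy := diff.2
  let k := 3 * ((if dx > 0 then (1 : Int) else 0) - (if dx < 0 then (1 : Int) else 0))
           + ((if dy > 0 then (1 : Int) else 0) - (if dy < 0 then (1 : Int) else 0))
  if k = 0 then 0
  else (max |dx| |dy| - 1) * 8 + (if k < 0 then k + 4 else k + 3)

-- ===== PRECONDITION & SPEC =====
def Spec_get_queen_plane_py (diff : Int × Int) (out : Int) : Prop := out = get_queen_plane_py_alt diff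
instance (diff : Int × Int) (out : Int) : Decidable (Spec_get_queen_plane_py diff out) := by unfold Spec_get_queen_plane_py; infer_instance

-- ===== CLAIM (what is proved, stated in full; the proofs are below) =====
def Claim_equal_get_queen_plane_py : Prop := ∀ (diff : Int × Int), Dom_get_queen_plane_py diff → Spec_get_queen_plane_py diff (get_queen_plane_py diff)

-- ===== LEMMAS AND PROOFS =====
lemma pyRange_m1_2 : PySem.List.pyRange (-1) 2 1 = [-1, 0, 1] := by decide

-- ===== VERDICT (by name: the statement is the Claim_ definition above) =====
theorem get_queen_plane_py_spec : Claim_equal_get_queen_plane_py := by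
  intro ⟨dx, dy⟩ _
  unfold Spec_get_queen_plane_py get_queen_plane_py get_queen_plane_py_alt
  have hb : ∀ v : Int,
      ((if v > 0 then (1 : Int) else 0) - (if v < 0 then (1 : Int) else 0)) = sign_py v := by
    intro v; unfold sign_py; split_ifs <;> omega
  have tri : ∀ v : Int, sign_py v = -1 ∨ sign_py v = 0 ∨ sign_py v = 1 := by
    intro v; unfold sign_py; split_ifs <;> simp
  simp only [hb]
  obtain hx | hx | hx := tri dx <;> obtain hy | hy | hy := tri dy <;>
    simp [pyRange_m1_2, List.foldl, hx, hy] <;> ring
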